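-- pv_equiv track=rewrite | github.com/gschen/where2go-python-test | 1906101041刘仕豪/力扣周赛/166 第二题.py | dier
-- ===== SOURCE A (Python) =====
-- def dier(l):
--     ll = []
--     for i in range(len(l)):
--         if l[i] != 0:
--             lis = [i]
--         if l[i] == 1:
--             ll.append(lis)
--             l[i] = 0
--         for j in range(i+1,len(l)):
--             if l[i]>len(lis) and l[i] == l[j]:
--                 lis.append(j)
--                 l[j] = 0
--                 if l[i] == len(lis):
--                     ll.sort()
--                     if lis not in ll:
--                         ll.append(lis)
--     return ll
-- ===== SOURCE B (Python) =====
-- def dier(l):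
--     # Bucket the indices of each positive value, cut each bucket into
--     # complete value-sized groups, and return the groups ordered by first index.
--     groups = []
--     for v in sorted(set(x for x in l if x > 0)):
--         idx = [i for i, x in enumerate(l) if x == v]
--         while len(idx) >= v:
--             groups.append(idx[:v])
--             idx = idx[v:]
--     groups.sort(key=lambda g: g[0])
--     return groups
-- ===== Notes on version B (the rewrite author's own statement) =====
-- stated objective: alternative
-- what changed: B replaces A's in-place quadratic scan (each group leader rescans and zeroes the rest of the mutated list, re-sorting the output as it goes) by bucketing the indices of each positive value once, chunking each bucket into complete value-sized groups, and one final sort of the groups by first index; Pre_ excludes lists of length >= 2 starting with 0, on which A raises NameError (its local `lis` is read before assignment); A also zeroes entries of its argument list in place, B does not mutate it.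
import Mathlib
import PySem

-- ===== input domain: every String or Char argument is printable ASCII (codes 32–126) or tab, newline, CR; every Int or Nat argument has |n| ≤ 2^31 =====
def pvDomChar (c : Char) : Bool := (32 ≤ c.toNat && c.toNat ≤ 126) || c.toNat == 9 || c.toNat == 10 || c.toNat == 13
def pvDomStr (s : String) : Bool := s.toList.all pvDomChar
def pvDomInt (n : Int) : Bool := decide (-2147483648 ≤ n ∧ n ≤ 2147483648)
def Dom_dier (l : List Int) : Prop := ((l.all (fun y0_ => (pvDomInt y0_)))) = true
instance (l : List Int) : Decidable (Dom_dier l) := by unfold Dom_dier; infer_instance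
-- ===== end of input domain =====

-- B buckets the indices of each positive value, chunks each bucket into value-sized groups
-- and sorts the groups by first index; return values agree (A zeroes entries of its argument
-- list in place, B does not mutate it — the claim is about the return value).

-- ===== PORT A =====
-- Indices from range(len(l)) are in-range naturals, so l[i] is List.getD i 0 and
-- l[i] = 0 is List.set i 0 (exact for in-range non-negative indices).
-- Python's local `lis` is unbound until the first index with l[i] != 0; reading it
-- unbound is a NameError (excluded by Pre_dier); the port starts lis at [] — on
-- inputs admitted by Pre_dier the unbound value is never read.
def dierInner (i : Nat) (st : List Int × List (List Int) × List Int) (j : Nat) :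
    List Int × List (List Int) × List Int :=
  let l := st.1
  let ll := st.2.1
  let lis := st.2.2
  if l.getD i 0 > (lis.length : Int) ∧ l.getD i 0 = l.getD j 0 then
    let lis := lis ++ [(j : Int)]
    let l := l.set j 0
    let ll := if l.getD i 0 = (lis.length : Int) then
        let ll := PySem.List.sorted ll (fun x => x) false   -- ll.sort(): Python lists compare lexicographically = List.lt
        if lis ∈ ll then ll else ll ++ [lis]
      else ll
    (l, ll, lis)
  else st

def dierStep (n : Nat) (st : List Int × List (List Int) × List Int) (i : Nat) :
    List Int × List (List Int) × List Int :=
  let l := st.1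
  let ll := st.2.1
  let lis := st.2.2
  let lis := if l.getD i 0 ≠ 0 then [(i : Int)] else lis
  let st2 := if l.getD i 0 = 1 then (l.set i 0, ll ++ [lis], lis) else (l, ll, lis)
  -- range(i+1, len(l)) over naturals
  ((List.range n).drop (i+1)).foldl (dierInner i) st2

def dier (l : List Int) : List (List Int) :=
  ((List.range l.length).foldl (dierStep l.length) (l, [], [])).2.1

-- ===== PORT B =====
-- while len(idx) >= v: groups.append(idx[:v]); idx = idx[v:]
-- (the `0 < v` conjunct is a totality guard only: every v iterated over is positive,
--  and in Python the loop would not terminate for v <= 0; idx[:v]/idx[v:] are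
--  take/drop since v > 0).
-- fuel = idx.length bounds the iteration count (each pass shortens idx by v >= 1),
-- so the fuelled loop is exactly Python's while loop.
def dierChunks : Nat → Int → List Int → List (List Int) → List (List Int)
  | 0, _, _, groups => groups
  | fuel + 1, v, idx, groups =>
    if 0 < v ∧ v ≤ (idx.length : Int) then
      dierChunks fuel v (idx.drop v.toNat) (groups ++ [idx.take v.toNat])
    else groups

def dier_alt (l : List Int) : List (List Int) :=
  let groups := (PySem.List.sorted (PySem.Set.ofList (l.filter (fun x => decide (0 < x))))
      (fun x => x) false).foldl (fun groups v =>
    let idx := (PySem.List.enumerate l).filterMap (fun p => if p.2 = v then some p.1 else none)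
    dierChunks idx.length v idx groups) []
  PySem.List.sorted groups (fun g => g.headD 0) false  -- groups.sort(key=lambda g: g[0]): every group is nonempty

-- ===== PRECONDITION & SPEC =====
-- Pre_dier excludes exactly the inputs on which A raises NameError: a list of
-- length >= 2 whose first element is 0 (the inner loop then reads `lis` unbound).
def Pre_dier (l : List Int) : Prop := l.length ≤ 1 ∨ l.getD 0 0 ≠ 0
instance (l : List Int) : Decidable (Pre_dier l) := by unfold Pre_dier; infer_instance
def pvWitness_dier : List Int := [2, 1, 2]


def Spec_dier (l : List Int) (out : List (List Int)) : Prop := out = dier_alt l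
instance (l : List Int) (out : List (List Int)) : Decidable (Spec_dier l out) := by unfold Spec_dier; infer_instance

-- ===== CLAIM (what is proved, stated in full; the proofs are below) =====
def Claim_equal_dier : Prop := ∀ (l : List Int), Dom_dier l → Pre_dier l → Spec_dier l (dier l)

-- ===== LEMMAS AND PROOFS =====

-- Positions >= i (naturals) holding value v.
def occAbove (l : List Int) (i : Nat) (v : Int) : List Nat :=
  (List.range' i (l.length - i)).filter (fun j => decide (l.getD j 0 = v))

theorem length_foldl_set0 (S : List Nat) : ∀ (l : List Int),
    (S.foldl (fun a j => a.set j 0) l).length = l.length := by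
  induction S with
  | nil => intro l; rfl
  | cons t S ih => intro l; simp [List.foldl_cons, ih]

-- The groups, in order of their first index, read off left to right (the order in
-- which A completes them); l evolves by zeroing consumed positions.
def modelG (l : List Int) (i : Nat) : List (List Int) :=
  if _h : i < l.length then
    if l.getD i 0 = 1 then [(i : Int)] :: modelG (l.set i 0) (i + 1)
    else if 1 < l.getD i 0 then
      if ((((occAbove l (i + 1) (l.getD i 0)).take ((l.getD i 0) - 1).toNat).length : Nat) : Int) =
          l.getD i 0 - 1 then
        ((i : Int) :: ((occAbove l (i + 1) (l.getD i 0)).take ((l.getD i 0) - 1).toNat).map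
            (fun j => Int.ofNat j)) ::
          modelG (((occAbove l (i + 1) (l.getD i 0)).take ((l.getD i 0) - 1).toNat).foldl
            (fun a j => a.set j 0) l) (i + 1)
      else
        modelG (((occAbove l (i + 1) (l.getD i 0)).take ((l.getD i 0) - 1).toNat).foldl
          (fun a j => a.set j 0) l) (i + 1)
    else modelG l (i + 1)
  else []
termination_by l.length - i
decreasing_by
  all_goals first
    | omega
    | (simp [length_foldl_set0]; omega)

-- Replay of the append/sort events of A's outer loop.
def foldG (ll : List (List Int)) (gs : List (List Int)) : List (List Int) :=
  gs.foldl (fun acc g =>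
    (if 1 < g.length then PySem.List.sorted acc (fun x => x) false else acc) ++ [g]) ll

-- complete chunks of size v of an occurrence list
def chunksModel (v : Int) (occ : List Nat) : List (List Int) :=
  if h : 0 < v ∧ v ≤ (occ.length : Int) then
    ((occ.take v.toNat).map (fun j => Int.ofNat j)) :: chunksModel v (occ.drop v.toNat)
  else []
termination_by occ.length
decreasing_by
  have h1 : 1 ≤ v.toNat := by omega
  have h2 : v.toNat ≤ occ.length := by omega
  simp [List.length_drop]; omega

-- getD through set at a different index
theorem getD_set_ne (l : List Int) (j i : Nat) (x : Int) (h : i ≠ j) :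
    (l.set j x).getD i 0 = l.getD i 0 := by
  rw [List.getD_eq_getElem?_getD, List.getD_eq_getElem?_getD,
    List.getElem?_set_ne (fun hq => h hq.symm)]

theorem getD_set_self0 (l : List Int) (j : Nat) : (l.set j 0).getD j 0 = 0 := by
  by_cases h : j < l.length
  · rw [List.getD_eq_getElem?_getD, List.getElem?_set_self h]
    rfl
  · rw [List.set_eq_of_length_le (by omega)]
    simp [List.getD_eq_getElem?_getD, List.getElem?_eq_none (by omega : l.length ≤ j)]

-- zeroing a set of positions, pointwise
theorem getD_foldl_set_zero (S : List Nat) : ∀ (l : List Int) (j : Nat),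
    (S.foldl (fun a t => a.set t 0) l).getD j 0 = if j ∈ S then 0 else l.getD j 0 := by
  induction S with
  | nil => intro l j; simp
  | cons t S ih =>
    intro l j
    rw [List.foldl_cons, ih]
    by_cases hj : j ∈ S
    · simp [hj]
    · by_cases hjt : j = t
      · subst hjt
        simp only [List.mem_cons, true_or, if_true]
        simp only [hj, if_false]
        exact getD_set_self0 l j
      · simp only [hj, hjt, if_false, List.mem_cons, false_or]
        exact getD_set_ne l t j 0 hjt

-- once lis is full (or l[i] <= 0), the inner loop does nothing
theorem innerId (i : Nat) : ∀ (J : List Nat) (st : List Int × List (List Int) × List Int),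
    st.1.getD i 0 ≤ (st.2.2.length : Int) → J.foldl (dierInner i) st = st := by
  intro J
  induction J with
  | nil => intro st _; rfl
  | cons j J ih =>
    intro st h
    rw [List.foldl_cons]
    have hst : dierInner i st j = st := by
      unfold dierInner
      rw [if_neg]
      push_neg
      intro hgt
      omega
    rw [hst]
    exact ih st h

-- characterisation of the inner loop while lis is not yet full
theorem innerRun (i : Nat) (v : Int) (hv : 2 ≤ v) :
    ∀ (J : List Nat) (l : List Int) (ll : List (List Int)) (lis : List Int),
    J.Nodup → (∀ j ∈ J, j ≠ i) →
    l.getD i 0 = v → (lis.length : Int) < v →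
    J.foldl (dierInner i) (l, ll, lis) =
      (let occ := J.filter (fun j => decide (l.getD j 0 = v))
       let taken := occ.take (v - lis.length).toNat
       let lis' := lis ++ taken.map (fun j => Int.ofNat j)
       (taken.foldl (fun a j => a.set j 0) l,
        (if (taken.length : Int) = v - (lis.length : Int) then
           (let s := PySem.List.sorted ll (fun x => x) false
            if lis' ∈ s then s else s ++ [lis'])
         else ll),
        lis')) := by
  intro J
  induction J with
  | nil =>
    intro l ll lis _ _ hgi hlen
    simp only [List.foldl_nil, List.filter_nil, List.take_nil]
    rw [if_neg (by simp; omega)]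
    simp
  | cons j J ih =>
    intro l ll lis hnd hni hgi hlen
    have hji : j ≠ i := hni j (by simp)
    have hJni : ∀ j' ∈ J, j' ≠ i := fun j' hj' => hni j' (by simp [hj'])
    have hjJ : j ∉ J := (List.nodup_cons.mp hnd).1
    have hJnd : J.Nodup := (List.nodup_cons.mp hnd).2
    rw [List.foldl_cons]
    by_cases hjv : l.getD j 0 = v
    · -- j is taken
      have hcond : l.getD i 0 > (lis.length : Int) ∧ l.getD i 0 = l.getD j 0 := by
        constructor
        · omega
        · rw [hgi, hjv]
      have hstep : dierInner i (l, ll, lis) j =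
          (l.set j 0,
           (if v = ((lis.length : Int) + 1) then
              (let s := PySem.List.sorted ll (fun x => x) false
               if lis ++ [(j : Int)] ∈ s then s else s ++ [lis ++ [(j : Int)]])
            else ll),
           lis ++ [(j : Int)]) := by
        unfold dierInner
        rw [if_pos hcond]
        have : (l.set j 0).getD i 0 = v := by rw [getD_set_ne _ _ _ _ (fun h => hji h.symm)]; exact hgi
        simp only [this, List.length_append, List.length_cons, List.length_nil]
        norm_num
      have hfJ : J.filter (fun j' => decide ((l.set j 0).getD j' 0 = v)) =
          J.filter (fun j' => decide (l.getD j' 0 = v)) := by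
        apply List.filter_congr
        intro x hx
        have hxj : x ≠ j := fun h => hjJ (h ▸ hx)
        rw [getD_set_ne _ _ _ _ hxj]
      by_cases hfull : (lis.length : Int) + 1 = v
      · -- the group is completed at j; the rest of the loop is the identity
        subst hfull
        rw [hstep]
        have hinner : ∀ (llx : List (List Int)),
            J.foldl (dierInner i) (l.set j 0, llx, lis ++ [(j : Int)]) =
              (l.set j 0, llx, lis ++ [(j : Int)]) := by
          intro llx
          refine innerId i J _ ?_
          show (l.set j 0).getD i 0 ≤ (((lis ++ [(j : Int)]).length : Nat) : Int)
          rw [getD_set_ne _ _ _ _ (fun h => hji h.symm), hgi, List.length_append,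
            List.length_cons, List.length_nil]
          push_cast
          omega
        rw [hinner]
        have hneed : (((lis.length : Int) + 1) - (lis.length : Int)).toNat = 1 := by omega
        rw [hneed]
        simp only [List.filter_cons, hjv, decide_true, if_true]
        simp only [List.take_succ_cons, List.take_zero, List.map_cons, List.map_nil,
          List.foldl_cons, List.foldl_nil, if_pos rfl]
        norm_num
      · -- not yet complete
        rw [hstep]
        rw [if_neg (show ¬(v = (lis.length : Int) + 1) from by omega)]
        rw [ih (l.set j 0) ll (lis ++ [(j : Int)]) hJnd hJni
          (by rw [getD_set_ne _ _ _ _ (fun h => hji h.symm)]; exact hgi)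
          (by simp; omega)]
        simp only [hfJ]
        have hneed : (v - (lis.length : Int)).toNat = (v - ((lis ++ [(j : Int)]).length : Int)).toNat + 1 := by
          simp
          omega
        simp only [List.filter_cons, hjv, decide_true, hneed, List.take_succ_cons]
        simp only [List.map_cons, List.foldl_cons, List.length_cons, List.length_append,
          List.length_map, List.append_assoc, List.cons_append, List.nil_append]
        congr 1
        simp only [List.length_take]
        push_cast
        first
          | exact if_congr (by omega) rfl rfl
          | exact Prod.ext (if_congr (by omega) rfl rfl) rfl
          | (simp
             first
               | exact if_congr (by omega) rfl rfl
               | exact Prod.ext (if_congr (by omega) rfl rfl) rfl)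
    · -- j is skipped
      have hstep : dierInner i (l, ll, lis) j = (l, ll, lis) := by
        unfold dierInner
        rw [if_neg (by
          push_neg
          intro _
          rw [hgi]
          exact fun h => hjv h.symm)]
      rw [hstep, ih l ll lis hJnd hJni hgi hlen]
      have hjv' : ¬(l[j]?.getD 0 = v) := by
        rw [← List.getD_eq_getElem?_getD]; exact hjv
      simp [List.filter_cons, hjv, hjv']

theorem foldG_cons (ll : List (List Int)) (g : List Int) (gs : List (List Int)) :
    foldG ll (g :: gs) =
      foldG ((if 1 < g.length then PySem.List.sorted ll (fun x => x) false else ll) ++ [g]) gs := rfl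

theorem outerRun : ∀ (k n i : Nat) (l : List Int) (ll : List (List Int)) (lis : List Int),
    l.length = n → n - i = k →
    (∀ g ∈ ll, g.headD 0 < (i : Int)) →
    ((List.range' i k).foldl (dierStep n) (l, ll, lis)).2.1 = foldG ll (modelG l i) := by
  intro k
  induction k with
  | zero =>
    intro n i l ll lis hlen hk hinv
    rw [modelG, dif_neg (by omega)]
    simp [foldG]
  | succ k ih =>
    intro n i l ll lis hlen hk hinv
    have hin : i < n := by omega
    rw [List.range'_succ, List.foldl_cons]
    by_cases hv1 : l.getD i 0 = 1
    · -- value 1: append [i] without sorting, zero position i, inner loop idle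
      have hstep : dierStep n (l, ll, lis) i = (l.set i 0, ll ++ [[(i : Int)]], [(i : Int)]) := by
        unfold dierStep
        simp only [hv1]
        norm_num
        exact innerId i _ _ (by
          show (l.set i 0).getD i 0 ≤ ((([(i : Int)]).length : Nat) : Int)
          rw [getD_set_self0]
          norm_num)
      rw [hstep]
      rw [ih n (i+1) (l.set i 0) (ll ++ [[(i : Int)]]) [(i : Int)] (by simp [hlen]) (by omega)
        (by
          intro g hg
          rcases List.mem_append.mp hg with h | h
          · have := hinv g h
            push_cast
            omega
          · simp only [List.mem_singleton] at h
            subst h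
            simp only [List.headD_cons]
            push_cast
            omega)]
      conv_rhs => rw [modelG, dif_pos (by omega : i < l.length), if_pos hv1]
      rw [foldG_cons, if_neg (by norm_num)]
    · by_cases hv2 : 1 < l.getD i 0
      · -- value >= 2: the inner loop collects the next (v-1) occurrences
        have hne0 : ¬(l.getD i 0 = 0) := by omega
        have hne0' : ¬(l[i]?.getD 0 = 0) := by
          rw [← List.getD_eq_getElem?_getD]; exact hne0
        have hstep : dierStep n (l, ll, lis) i =
            ((List.range n).drop (i+1)).foldl (dierInner i) (l, ll, [(i : Int)]) := by
          unfold dierStep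
          simp only [hne0, hv1]
          norm_num
          simp [hne0']
        have hJ : (List.range n).drop (i+1) = List.range' (i+1) (n - (i+1)) := by
          simp [List.range_eq_range', List.drop_range']
        rw [hstep, hJ]
        rw [innerRun i (l.getD i 0) (by omega) (List.range' (i+1) (n - (i+1))) l ll [(i : Int)]
          (List.nodup_range' _ (by norm_num))
          (by
            intro j hj
            have := List.mem_range'.mp hj
            omega)
          rfl
          (by simp only [List.length_cons, List.length_nil]; omega)]
        have hocc : (List.range' (i+1) (n - (i+1))).filter (fun j => decide (l.getD j 0 = l.getD i 0)) =
            occAbove l (i+1) (l.getD i 0) := by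
          rw [occAbove, hlen]
        simp only [hocc, List.length_cons, List.length_nil, Nat.zero_add, Nat.cast_one,
          List.singleton_append]
        by_cases hcomp : ((((occAbove l (i + 1) (l.getD i 0)).take ((l.getD i 0) - 1).toNat).length : Nat) : Int) =
            l.getD i 0 - 1
        · rw [if_pos hcomp]
          rw [if_neg (show ¬((i : Int) :: ((occAbove l (i + 1) (l.getD i 0)).take
              ((l.getD i 0) - 1).toNat).map (fun j => Int.ofNat j) ∈
                PySem.List.sorted ll (fun x => x) false) from by
            intro hmem
            rw [PySem.List.mem_sorted] at hmem
            have h2 := hinv _ hmem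
            simp only [List.headD_cons] at h2
            omega)]
          rw [ih n (i+1) _ _ _ (by rw [length_foldl_set0]; exact hlen) (by omega)
            (by
              intro g hg
              rcases List.mem_append.mp hg with h | h
              · rw [PySem.List.mem_sorted] at h
                have := hinv g h
                push_cast
                omega
              · simp only [List.mem_singleton] at h
                subst h
                simp only [List.headD_cons]
                push_cast
                omega)]
          conv_rhs => rw [modelG, dif_pos (by omega : i < l.length), if_neg hv1, if_pos hv2,
            if_pos hcomp]
          rw [foldG_cons, if_pos (by
            have hpos : 0 < ((occAbove l (i + 1) (l.getD i 0)).take ((l.getD i 0) - 1).toNat).length := by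
              omega
            simp at hpos ⊢
            all_goals omega)]
        · rw [if_neg hcomp]
          rw [ih n (i+1) _ _ _ (by rw [length_foldl_set0]; exact hlen) (by omega)
            (by
              intro g hg
              have := hinv g hg
              push_cast
              omega)]
          conv_rhs => rw [modelG, dif_pos (by omega : i < l.length), if_neg hv1, if_pos hv2,
            if_neg hcomp]
      · -- value <= 0: nothing happens
        have hv0 : l.getD i 0 ≤ 0 := by omega
        have hstep : dierStep n (l, ll, lis) i =
            (l, ll, if l.getD i 0 ≠ 0 then [(i : Int)] else lis) := by
          show ((List.range n).drop (i+1)).foldl (dierInner i)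
              (if l.getD i 0 = 1
               then (l.set i 0, ll ++ [if l.getD i 0 ≠ 0 then [(i : Int)] else lis],
                     if l.getD i 0 ≠ 0 then [(i : Int)] else lis)
               else (l, ll, if l.getD i 0 ≠ 0 then [(i : Int)] else lis)) =
            (l, ll, if l.getD i 0 ≠ 0 then [(i : Int)] else lis)
          rw [if_neg hv1]
          exact innerId i _ _ (by
            show l.getD i 0 ≤ (((if l.getD i 0 ≠ 0 then [(i : Int)] else lis).length : Nat) : Int)
            omega)
        rw [hstep]
        rw [ih n (i+1) l ll _ hlen (by omega)
          (by
            intro g hg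
            have := hinv g hg
            push_cast
            omega)]
        conv_rhs => rw [modelG, dif_pos (by omega : i < l.length), if_neg hv1, if_neg hv2]

theorem dier_A_eq_foldG (l : List Int) : dier l = foldG [] (modelG l 0) := by
  unfold dier
  have h := outerRun l.length l.length 0 l [] [] rfl (by omega) (by simp)
  rw [List.range_eq_range']
  simpa using h

-- chunksModel unfoldings
theorem chunksModel_pos (v : Int) (occ : List Nat) (h : 0 < v ∧ v ≤ (occ.length : Int)) :
    chunksModel v occ =
      ((occ.take v.toNat).map (fun j => Int.ofNat j)) :: chunksModel v (occ.drop v.toNat) := by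
  rw [chunksModel, dif_pos h]

theorem chunksModel_neg (v : Int) (occ : List Nat) (h : ¬(0 < v ∧ v ≤ (occ.length : Int))) :
    chunksModel v occ = [] := by
  rw [chunksModel, dif_neg h]

-- the fuelled while loop produces exactly the complete chunks
theorem dierChunks_spec : ∀ (fuel : Nat) (occ : List Nat) (v : Int) (groups : List (List Int)),
    occ.length ≤ fuel →
    dierChunks fuel v (occ.map (fun j => Int.ofNat j)) groups = groups ++ chunksModel v occ := by
  intro fuel
  induction fuel with
  | zero =>
    intro occ v groups h
    have hocc : occ = [] := List.eq_nil_of_length_eq_zero (by omega)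
    subst hocc
    rw [chunksModel_neg v [] (by rintro ⟨h1, h2⟩; simp at h2; omega)]
    simp [dierChunks]
  | succ fuel ih =>
    intro occ v groups h
    simp only [dierChunks]
    by_cases hc : 0 < v ∧ v ≤ (occ.length : Int)
    · rw [if_pos (by simpa using hc)]
      rw [← List.map_drop, ← List.map_take]
      rw [ih (occ.drop v.toNat) v _ (by simp; omega)]
      rw [chunksModel_pos v occ hc]
      simp
    · rw [if_neg (by simpa using hc), chunksModel_neg v occ hc]
      simp

-- the index comprehension is occAbove at 0
theorem enum_filter_eq (v : Int) : ∀ (l : List Int) (s : Int),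
    (PySem.List.enumerate l s).filterMap (fun p => if p.2 = v then some p.1 else none) =
      ((List.range l.length).filter (fun j => decide (l.getD j 0 = v))).map
        (fun j => Int.ofNat j + s) := by
  intro l
  induction l with
  | nil => intro s; simp [PySem.List.enumerate_nil]
  | cons x xs ih =>
    intro s
    rw [PySem.List.enumerate_cons, List.filterMap_cons]
    have hr : List.range (x :: xs).length = 0 :: (List.range xs.length).map Nat.succ := by
      rw [List.length_cons, List.range_succ_eq_map]
    rw [hr, List.filter_cons]
    have hmapfil : (List.filter (fun j => decide ((x :: xs).getD j 0 = v))
        ((List.range xs.length).map Nat.succ)) =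
        ((List.range xs.length).filter (fun j => decide (xs.getD j 0 = v))).map Nat.succ := by
      rw [List.filter_map]
      rfl
    have htail : List.map (fun j => Int.ofNat j + s)
        (((List.range xs.length).filter (fun j => decide (xs.getD j 0 = v))).map Nat.succ) =
        List.map (fun j => Int.ofNat j + (s + 1))
          ((List.range xs.length).filter (fun j => decide (xs.getD j 0 = v))) := by
      rw [List.map_map]
      apply List.map_congr_left
      intro a _
      show Int.ofNat (a + 1) + s = Int.ofNat a + (s + 1)
      simp only [Int.ofNat_eq_natCast]
      push_cast
      omega
    by_cases hx : x = v
    · rw [if_pos (show (s, x).2 = v from hx)]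
      rw [ih (s + 1)]
      rw [if_pos (by simpa [List.getD_cons_zero] using hx)]
      rw [List.map_cons, hmapfil, htail]
      show s :: _ = (Int.ofNat 0 + s) :: _
      congr 1
      simp only [Int.ofNat_eq_natCast]
      push_cast
      omega
    · rw [if_neg (show ¬((s, x).2 = v) from hx)]
      rw [ih (s + 1)]
      rw [if_neg (by simpa [List.getD_cons_zero] using hx)]
      rw [hmapfil, htail]

theorem idx_eq_occAbove (l : List Int) (v : Int) :
    (PySem.List.enumerate l).filterMap (fun p => if p.2 = v then some p.1 else none) =
      (occAbove l 0 v).map (fun j => Int.ofNat j) := by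
  have h := enum_filter_eq v l 0
  rw [occAbove]
  have hr : List.range' 0 (l.length - 0) = List.range l.length := by
    rw [Nat.sub_zero, List.range_eq_range']
  rw [hr]
  simpa using h

-- one bucket step of B's fold
def bFold (l : List Int) (groups : List (List Int)) (v : Int) : List (List Int) :=
  let idx := (PySem.List.enumerate l).filterMap (fun p => if p.2 = v then some p.1 else none)
  dierChunks idx.length v idx groups

theorem bFold_eq (l : List Int) (acc : List (List Int)) (v : Int) :
    bFold l acc v = acc ++ chunksModel v (occAbove l 0 v) := by
  unfold bFold
  rw [idx_eq_occAbove l v]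
  rw [dierChunks_spec _ _ _ _ (by simp)]

theorem foldl_bFold (l : List Int) : ∀ (V : List Int) (acc : List (List Int)),
    V.foldl (bFold l) acc = acc ++ V.flatMap (fun v => chunksModel v (occAbove l 0 v)) := by
  intro V
  induction V with
  | nil => intro acc; simp
  | cons v V ih =>
    intro acc
    rw [List.foldl_cons, bFold_eq, ih, List.flatMap_cons, List.append_assoc]

-- occAbove structure lemmas
theorem occAbove_stop (l : List Int) (i : Nat) (v : Int) (h : l.length ≤ i) :
    occAbove l i v = [] := by
  rw [occAbove]
  have h0 : l.length - i = 0 := by omega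
  rw [h0]
  rfl

theorem occAbove_cons (l : List Int) (i : Nat) (v : Int) (h : i < l.length) :
    occAbove l i v = (if l.getD i 0 = v then [i] else []) ++ occAbove l (i+1) v := by
  rw [occAbove, occAbove]
  have h1 : l.length - i = (l.length - (i+1)) + 1 := by omega
  rw [h1, List.range'_succ, List.filter_cons]
  by_cases hv : l.getD i 0 = v
  · have hv' : l[i]?.getD 0 = v := by rw [← List.getD_eq_getElem?_getD]; exact hv
    simp [hv, hv']
  · have hv' : ¬(l[i]?.getD 0 = v) := by rw [← List.getD_eq_getElem?_getD]; exact hv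
    simp [hv, hv']

theorem occAbove_set_lt (l : List Int) (j i : Nat) (v x : Int) (h : j < i) :
    occAbove (l.set j x) i v = occAbove l i v := by
  rw [occAbove, occAbove, List.length_set]
  apply List.filter_congr
  intro y hy
  rcases List.mem_range'.mp hy with ⟨t, ht, rfl⟩
  have hyj : i + 1 * t ≠ j := by omega
  rw [getD_set_ne _ _ _ _ hyj]

theorem occAbove_mem (l : List Int) (i : Nat) (v : Int) :
    ∀ j ∈ occAbove l i v, i ≤ j ∧ j < l.length ∧ l.getD j 0 = v := by
  intro j hj
  rw [occAbove] at hj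
  have h1 := List.mem_filter.mp hj
  rcases List.mem_range'.mp h1.1 with ⟨t, ht, rfl⟩
  exact ⟨by omega, by omega, by simpa using h1.2⟩

theorem occAbove_nodup (l : List Int) (i : Nat) (v : Int) : (occAbove l i v).Nodup :=
  List.Nodup.filter _ (List.nodup_range' _ (by norm_num))

theorem occAbove_foldl_set (l : List Int) (S : List Nat) (i : Nat) (v : Int) (hv : v ≠ 0) :
    occAbove (S.foldl (fun a j => a.set j 0) l) i v =
      (occAbove l i v).filter (fun j => decide (j ∉ S)) := by
  rw [occAbove, occAbove, length_foldl_set0, List.filter_filter]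
  apply List.filter_congr
  intro y _
  rw [getD_foldl_set_zero]
  by_cases hyS : y ∈ S
  · have h0 : ¬((0:Int) = v) := fun h => hv h.symm
    simp [hyS, h0]
  · simp [hyS]

theorem filter_not_mem_take (xs : List Nat) (k : Nat) (hnd : xs.Nodup) :
    xs.filter (fun j => decide (j ∉ xs.take k)) = xs.drop k := by
  have hsplit : xs.filter (fun j => decide (j ∉ xs.take k)) =
      (xs.take k ++ xs.drop k).filter (fun j => decide (j ∉ xs.take k)) := by
    rw [List.take_append_drop]
  rw [hsplit, List.filter_append]
  have h1 : (xs.take k).filter (fun j => decide (j ∉ xs.take k)) = [] := by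
    rw [List.filter_eq_nil_iff]
    intro a ha
    simp [ha]
  have h2 : (xs.drop k).filter (fun j => decide (j ∉ xs.take k)) = xs.drop k := by
    rw [List.filter_eq_self]
    intro a ha
    have hd := List.disjoint_take_drop (l := xs) hnd (le_refl k)
    simp only [decide_eq_true_eq]
    intro hmem
    exact hd hmem ha
  rw [h1, h2, List.nil_append]

theorem occAbove_after_zero (l : List Int) (i : Nat) (v : Int) (hv : v ≠ 0) (k : Nat) :
    occAbove (((occAbove l i v).take k).foldl (fun a j => a.set j 0) l) i v =
      (occAbove l i v).drop k := by
  rw [occAbove_foldl_set l _ i v hv, filter_not_mem_take _ _ (occAbove_nodup l i v)]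

theorem occAbove_after_zero_ne (l : List Int) (i i' : Nat) (v w : Int) (hw : w ≠ 0)
    (hvw : w ≠ v) (k : Nat) :
    occAbove (((occAbove l i v).take k).foldl (fun a j => a.set j 0) l) i' w =
      occAbove l i' w := by
  rw [occAbove_foldl_set l _ i' w hw]
  rw [List.filter_eq_self.mpr]
  intro a ha
  simp only [decide_eq_true_eq]
  intro hmem
  have h1 := (occAbove_mem l i' w a ha).2.2
  have h2 := (occAbove_mem l i v a (List.mem_of_mem_take hmem)).2.2
  exact hvw (h1.symm.trans h2)

-- extracting one bucket's first chunk out of the flatMap, up to permutation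
theorem flatMap_extract (f f' : Int → List (List Int)) (v : Int) (c : List Int) :
    ∀ (V : List Int), V.Nodup → v ∈ V → f v = c :: f' v → (∀ w ∈ V, w ≠ v → f w = f' w) →
    (V.flatMap f).Perm (c :: V.flatMap f') := by
  intro V
  induction V with
  | nil => intro _ hv _ _; cases hv
  | cons w V ih =>
    intro hnd hv hf hother
    rw [List.flatMap_cons, List.flatMap_cons]
    by_cases hwv : w = v
    · subst hwv
      have hVf : V.flatMap f = V.flatMap f' := by
        apply List.flatMap_congr
        intro x hx
        have hxw : x ≠ w := fun h => (List.nodup_cons.mp hnd).1 (h ▸ hx)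
        exact hother x (by simp [hx]) hxw
      rw [hf, hVf]
      exact List.Perm.refl _
    · have hvV : v ∈ V := by
        rcases List.mem_cons.mp hv with h | h
        · exact absurd h (fun hh => hwv hh.symm)
        · exact h
      rw [hother w (by simp) hwv]
      have hperm := ih (List.nodup_cons.mp hnd).2 hvV hf
        (fun x hx hxv => hother x (by simp [hx]) hxv)
      exact (hperm.append_left (f' w)).trans List.perm_middle

-- the scan order lists the same chunks as the buckets, up to permutation
theorem modelG_perm (V : List Int) (hnd : V.Nodup) (hpos : ∀ v ∈ V, 0 < v) :
    ∀ (l : List Int) (i : Nat),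
    (∀ j : Nat, i ≤ j → j < l.length → 0 < l.getD j 0 → l.getD j 0 ∈ V) →
    (modelG l i).Perm (V.flatMap (fun v => chunksModel v (occAbove l i v))) := by
  intro l i
  induction l, i using modelG.induct with
  | case5 l i h =>
    intro _
    rw [modelG, dif_neg h]
    have hall : V.flatMap (fun v => chunksModel v (occAbove l i v)) = [] := by
      rw [List.flatMap_eq_nil_iff]
      intro v _
      rw [occAbove_stop l i v (by omega)]
      exact chunksModel_neg v [] (by rintro ⟨h1, h2⟩; simp at h2; omega)
    rw [hall]
  | case1 l i h hv ih =>
    intro hcov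
    rw [modelG, dif_pos h, if_pos hv]
    have h1V : (1 : Int) ∈ V := by
      have := hcov i (le_refl i) h (by rw [hv]; norm_num)
      rwa [hv] at this
    have hcov' : ∀ j : Nat, i+1 ≤ j → j < (l.set i 0).length → 0 < (l.set i 0).getD j 0 →
        (l.set i 0).getD j 0 ∈ V := by
      intro j hj hjl hjpos
      rw [getD_set_ne _ _ _ _ (by omega : j ≠ i)] at hjpos ⊢
      exact hcov j (by omega) (by simpa using hjl) hjpos
    have hf1 : chunksModel 1 (occAbove l i 1) =
        [(i : Int)] :: chunksModel 1 (occAbove (l.set i 0) (i+1) 1) := by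
      rw [occAbove_cons l i 1 h, if_pos hv, List.singleton_append]
      rw [chunksModel_pos 1 _ ⟨by norm_num, by simp⟩]
      rw [occAbove_set_lt l i (i+1) 1 0 (by omega)]
      norm_num
    have hother : ∀ w ∈ V, w ≠ 1 → chunksModel w (occAbove l i w) =
        chunksModel w (occAbove (l.set i 0) (i+1) w) := by
      intro w hw hw1
      rw [occAbove_cons l i w h, if_neg (by rw [hv]; exact fun hh => hw1 hh.symm),
        List.nil_append, occAbove_set_lt l i (i+1) w 0 (by omega)]
    have hext := flatMap_extract (fun v => chunksModel v (occAbove l i v))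
      (fun v => chunksModel v (occAbove (l.set i 0) (i+1) v)) 1 [(i : Int)] V hnd h1V hf1 hother
    exact ((ih hcov').cons _).trans hext.symm
  | case2 l i h hv1 hv2 hcomp ih =>
    intro hcov
    rw [modelG, dif_pos h, if_neg hv1, if_pos hv2, if_pos hcomp]
    have hvV : l.getD i 0 ∈ V := hcov i (le_refl i) h (by omega)
    have hv0 : l.getD i 0 ≠ 0 := by omega
    have hcov' : ∀ j : Nat, i+1 ≤ j →
        j < ((List.take (l.getD i 0 - 1).toNat (occAbove l (i + 1) (l.getD i 0))).foldl
          (fun a j => a.set j 0) l).length →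
        0 < ((List.take (l.getD i 0 - 1).toNat (occAbove l (i + 1) (l.getD i 0))).foldl
          (fun a j => a.set j 0) l).getD j 0 →
        ((List.take (l.getD i 0 - 1).toNat (occAbove l (i + 1) (l.getD i 0))).foldl
          (fun a j => a.set j 0) l).getD j 0 ∈ V := by
      intro j hj hjl hjpos
      rw [getD_foldl_set_zero] at hjpos ⊢
      rw [length_foldl_set0] at hjl
      by_cases hjS : j ∈ List.take (l.getD i 0 - 1).toNat (occAbove l (i + 1) (l.getD i 0))
      · rw [if_pos hjS] at hjpos
        omega
      · rw [if_neg hjS] at hjpos ⊢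
        exact hcov j (by omega) hjl hjpos
    have hf : chunksModel (l.getD i 0) (occAbove l i (l.getD i 0)) =
        ((i : Int) :: (List.take (l.getD i 0 - 1).toNat
            (occAbove l (i + 1) (l.getD i 0))).map (fun j => Int.ofNat j)) ::
          chunksModel (l.getD i 0)
            (occAbove ((List.take (l.getD i 0 - 1).toNat (occAbove l (i + 1) (l.getD i 0))).foldl
              (fun a j => a.set j 0) l) (i+1) (l.getD i 0)) := by
      rw [occAbove_cons l i _ h, if_pos rfl, List.singleton_append]
      rw [chunksModel_pos _ _ ⟨by omega, by
        have h2 := hcomp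
        simp only [List.length_take] at h2
        simp only [List.length_cons]
        push_cast at h2 ⊢
        omega⟩]
      have hlen2 : (l.getD i 0).toNat = (l.getD i 0 - 1).toNat + 1 := by omega
      rw [hlen2, List.take_succ_cons, List.drop_succ_cons]
      rw [occAbove_after_zero l (i+1) _ hv0 _]
      simp [Int.ofNat_eq_natCast]
    have hother : ∀ w ∈ V, w ≠ l.getD i 0 → chunksModel w (occAbove l i w) =
        chunksModel w (occAbove ((List.take (l.getD i 0 - 1).toNat
          (occAbove l (i + 1) (l.getD i 0))).foldl (fun a j => a.set j 0) l) (i+1) w) := by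
      intro w hw hwv
      rw [occAbove_cons l i w h, if_neg (fun hh => hwv hh.symm), List.nil_append,
        occAbove_after_zero_ne l (i+1) (i+1) _ w (by have := hpos w hw; omega) hwv _]
    have hext := flatMap_extract _ _ (l.getD i 0) _ V hnd hvV hf hother
    exact ((ih hcov').cons _).trans hext.symm
  | case3 l i h hv1 hv2 hcomp ih =>
    intro hcov
    rw [modelG, dif_pos h, if_neg hv1, if_pos hv2, if_neg hcomp]
    have hv0 : l.getD i 0 ≠ 0 := by omega
    have hcov' : ∀ j : Nat, i+1 ≤ j →
        j < ((List.take (l.getD i 0 - 1).toNat (occAbove l (i + 1) (l.getD i 0))).foldl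
          (fun a j => a.set j 0) l).length →
        0 < ((List.take (l.getD i 0 - 1).toNat (occAbove l (i + 1) (l.getD i 0))).foldl
          (fun a j => a.set j 0) l).getD j 0 →
        ((List.take (l.getD i 0 - 1).toNat (occAbove l (i + 1) (l.getD i 0))).foldl
          (fun a j => a.set j 0) l).getD j 0 ∈ V := by
      intro j hj hjl hjpos
      rw [getD_foldl_set_zero] at hjpos ⊢
      rw [length_foldl_set0] at hjl
      by_cases hjS : j ∈ List.take (l.getD i 0 - 1).toNat (occAbove l (i + 1) (l.getD i 0))
      · rw [if_pos hjS] at hjpos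
        omega
      · rw [if_neg hjS] at hjpos ⊢
        exact hcov j (by omega) hjl hjpos
    have hocc0 : occAbove ((List.take (l.getD i 0 - 1).toNat
        (occAbove l (i + 1) (l.getD i 0))).foldl (fun a j => a.set j 0) l) (i+1)
          (l.getD i 0) = [] := by
      rw [occAbove_after_zero l (i+1) _ hv0 _]
      apply List.drop_eq_nil_of_le
      have h2 := hcomp
      simp only [List.length_take] at h2
      omega
    have hcongr : ∀ w ∈ V, chunksModel w (occAbove l i w) =
        chunksModel w (occAbove ((List.take (l.getD i 0 - 1).toNat
          (occAbove l (i + 1) (l.getD i 0))).foldl (fun a j => a.set j 0) l) (i+1) w) := by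
      intro w hw
      by_cases hwv : w = l.getD i 0
      · subst hwv
        rw [occAbove_cons l i _ h, if_pos rfl, List.singleton_append, hocc0]
        rw [chunksModel_neg _ [] (by rintro ⟨ha, hb⟩; simp only [List.length_nil] at hb; omega)]
        apply chunksModel_neg
        rintro ⟨ha, hb⟩
        have h2 := hcomp
        simp only [List.length_take] at h2
        simp only [List.length_cons] at hb
        push_cast at h2 hb ⊢
        omega
      · rw [occAbove_cons l i w h, if_neg (fun hh => hwv hh.symm), List.nil_append,
          occAbove_after_zero_ne l (i+1) (i+1) _ w (by have := hpos w hw; omega) hwv _]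
    rw [List.flatMap_congr hcongr]
    exact ih hcov'
  | case4 l i h hv1 hv2 ih =>
    intro hcov
    rw [modelG, dif_pos h, if_neg hv1, if_neg hv2]
    have hcov' : ∀ j : Nat, i+1 ≤ j → j < l.length → 0 < l.getD j 0 → l.getD j 0 ∈ V :=
      fun j hj hjl hjp => hcov j (by omega) hjl hjp
    have hcongr : ∀ w ∈ V, chunksModel w (occAbove l i w) =
        chunksModel w (occAbove l (i+1) w) := by
      intro w hw
      rw [occAbove_cons l i w h,
        if_neg (by intro hh; have := hpos w hw; omega), List.nil_append]
    rw [List.flatMap_congr hcongr]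
    exact ih hcov'

theorem modelG_head : ∀ (l : List Int) (i : Nat), ∀ g ∈ modelG l i, (i : Int) ≤ g.headD 0 := by
  intro l i
  induction l, i using modelG.induct with
  | case1 l i h hv ih =>
    intro g hg
    rw [modelG, dif_pos h, if_pos hv] at hg
    rcases List.mem_cons.mp hg with rfl | hg
    · simp
    · have := ih g hg
      push_cast at this ⊢
      omega
  | case2 l i h hv1 hv2 hcomp ih =>
    intro g hg
    rw [modelG, dif_pos h, if_neg hv1, if_pos hv2, if_pos hcomp] at hg
    rcases List.mem_cons.mp hg with rfl | hg
    · simp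
    · have := ih g hg
      push_cast at this ⊢
      omega
  | case3 l i h hv1 hv2 hcomp ih =>
    intro g hg
    rw [modelG, dif_pos h, if_neg hv1, if_pos hv2, if_neg hcomp] at hg
    have := ih g hg
    push_cast at this ⊢
    omega
  | case4 l i h hv1 hv2 ih =>
    intro g hg
    rw [modelG, dif_pos h, if_neg hv1, if_neg hv2] at hg
    have := ih g hg
    push_cast at this ⊢
    omega
  | case5 l i h =>
    intro g hg
    rw [modelG, dif_neg h] at hg
    cases hg

theorem modelG_pairwise : ∀ (l : List Int) (i : Nat),
    (modelG l i).Pairwise (fun a b => a.headD 0 < b.headD 0) := by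
  intro l i
  induction l, i using modelG.induct with
  | case1 l i h hv ih =>
    rw [modelG, dif_pos h, if_pos hv]
    refine List.Pairwise.cons ?_ ih
    intro g hg
    have := modelG_head _ _ g hg
    simp only [List.headD_cons]
    push_cast at this ⊢
    omega
  | case2 l i h hv1 hv2 hcomp ih =>
    rw [modelG, dif_pos h, if_neg hv1, if_pos hv2, if_pos hcomp]
    refine List.Pairwise.cons ?_ ih
    intro g hg
    have := modelG_head _ _ g hg
    simp only [List.headD_cons]
    push_cast at this ⊢
    omega
  | case3 l i h hv1 hv2 hcomp ih =>
    rw [modelG, dif_pos h, if_neg hv1, if_pos hv2, if_neg hcomp]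
    exact ih
  | case4 l i h hv1 hv2 ih =>
    rw [modelG, dif_pos h, if_neg hv1, if_neg hv2]
    exact ih
  | case5 l i h =>
    rw [modelG, dif_neg h]
    exact List.Pairwise.nil

theorem modelG_nonempty : ∀ (l : List Int) (i : Nat), ∀ g ∈ modelG l i, g ≠ [] := by
  intro l i
  induction l, i using modelG.induct with
  | case1 l i h hv ih =>
    intro g hg
    rw [modelG, dif_pos h, if_pos hv] at hg
    rcases List.mem_cons.mp hg with rfl | hg
    · simp
    · exact ih g hg
  | case2 l i h hv1 hv2 hcomp ih =>
    intro g hg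
    rw [modelG, dif_pos h, if_neg hv1, if_pos hv2, if_pos hcomp] at hg
    rcases List.mem_cons.mp hg with rfl | hg
    · simp
    · exact ih g hg
  | case3 l i h hv1 hv2 hcomp ih =>
    intro g hg
    rw [modelG, dif_pos h, if_neg hv1, if_pos hv2, if_neg hcomp] at hg
    exact ih g hg
  | case4 l i h hv1 hv2 ih =>
    intro g hg
    rw [modelG, dif_pos h, if_neg hv1, if_neg hv2] at hg
    exact ih g hg
  | case5 l i h =>
    intro g hg
    rw [modelG, dif_neg h] at hg
    cases hg

-- A's interleaved ll.sort() calls are no-ops: ll always holds nonempty groups whose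
-- first elements strictly increase, and Python's lexicographic list order agrees with
-- comparison of these first elements.
theorem not_lt_of_head_lt (x y : Int) (xs ys : List Int) (h : x < y) : ¬ ((y::ys) < (x::xs)) := by
  rw [List.cons_lt_cons_iff]
  rintro (h' | ⟨rfl, _⟩) <;> omega

theorem foldl_insertBy_id (gs : List (List Int)) : ∀ (acc : List (List Int)),
    (∀ g ∈ acc ++ gs, g ≠ []) → (acc ++ gs).Pairwise (fun a b => a.headD 0 < b.headD 0) →
    gs.foldl (fun a x => PySem.List.insertBy (fun a b => decide ((fun t => t) a < (fun t => t) b)) x a) acc = acc ++ gs := by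
  induction gs with
  | nil => intro acc _ _; simp
  | cons g gs ih =>
    intro acc hne hp
    rw [List.foldl_cons, PySem.List.insertBy_of_forall_not_before _ _ _ ?_, ih (acc ++ [g]) ?_ ?_]
    · simp
    · intro y hy; refine hne y ?_; simp at hy ⊢; tauto
    · have : acc ++ [g] ++ gs = acc ++ g :: gs := by simp
      rw [this]; exact hp
    · intro y hy
      have hyg : y.headD 0 < g.headD 0 := by
        have := (List.pairwise_append.mp hp).2.2 y hy g (by simp)
        exact this
      have hyne : y ≠ [] := hne y (List.mem_append.mpr (.inl hy))
      have hgne : g ≠ [] := hne g (by simp)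
      obtain ⟨a, as, rfl⟩ := List.exists_cons_of_ne_nil hgne
      obtain ⟨b, bs, rfl⟩ := List.exists_cons_of_ne_nil hyne
      simp only [List.headD_cons] at hyg
      simpa using not_lt_of_head_lt b a bs as hyg

theorem sorted_id_eq_self (ll : List (List Int)) (hne : ∀ g ∈ ll, g ≠ [])
    (hp : ll.Pairwise (fun a b => a.headD 0 < b.headD 0)) :
    PySem.List.sorted ll (fun x => x) false = ll := by
  rw [PySem.List.sorted_eq_foldl_insertBy]
  simpa using foldl_insertBy_id ll [] (by simpa using hne) (by simpa using hp)

theorem foldG_id (gs : List (List Int)) : ∀ (ll : List (List Int)),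
    (∀ g ∈ ll ++ gs, g ≠ []) → (ll ++ gs).Pairwise (fun a b => a.headD 0 < b.headD 0) →
    foldG ll gs = ll ++ gs := by
  induction gs with
  | nil => intro ll _ _; simp [foldG]
  | cons g gs ih =>
    intro ll hne hp
    rw [foldG_cons]
    have hsort : (if 1 < g.length then PySem.List.sorted ll (fun x => x) false else ll) = ll := by
      split_ifs with h1
      · exact sorted_id_eq_self ll
          (fun g' hg' => hne g' (List.mem_append.mpr (.inl hg')))
          ((List.pairwise_append.mp hp).1)
      · rfl
    rw [hsort]
    rw [ih (ll ++ [g]) ?_ ?_]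
    · simp
    · intro y hy; refine hne y ?_; simp at hy ⊢; tauto
    · have : ll ++ [g] ++ gs = ll ++ g :: gs := by simp
      rw [this]; exact hp

theorem dier_A_eq_model (l : List Int) : dier l = modelG l 0 := by
  rw [dier_A_eq_foldG l]
  simpa using foldG_id (modelG l 0) []
    (by simpa using modelG_nonempty l 0)
    (by simpa using modelG_pairwise l 0)

theorem dier_B_eq_model (l : List Int) : dier_alt l = modelG l 0 := by
  show PySem.List.sorted
      ((PySem.List.sorted (PySem.Set.ofList (l.filter (fun x => decide (0 < x))))
          (fun x => x) false).foldl (bFold l) [])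
      (fun g => g.headD 0) false = modelG l 0
  rw [foldl_bFold, List.nil_append]
  have hndV : (PySem.List.sorted (PySem.Set.ofList (l.filter (fun x => decide (0 < x))))
      (fun x => x) false).Nodup :=
    (PySem.List.sorted_perm _ _ _).symm.nodup (PySem.Set.nodup_ofList _)
  have hposV : ∀ v ∈ PySem.List.sorted (PySem.Set.ofList (l.filter (fun x => decide (0 < x))))
      (fun x => x) false, 0 < v := by
    intro v hv
    rw [PySem.List.mem_sorted, PySem.Set.mem_ofList] at hv
    have := List.mem_filter.mp hv
    simpa using this.2
  have hcov : ∀ j : Nat, 0 ≤ j → j < l.length → 0 < l.getD j 0 →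
      l.getD j 0 ∈ PySem.List.sorted (PySem.Set.ofList (l.filter (fun x => decide (0 < x))))
        (fun x => x) false := by
    intro j _ hj hpos
    rw [PySem.List.mem_sorted, PySem.Set.mem_ofList]
    apply List.mem_filter.mpr
    constructor
    · rw [List.getD_eq_getElem l 0 hj]
      exact List.getElem_mem hj
    · simpa using hpos
  exact PySem.List.sorted_eq_of_perm_of_pairwise_lt
    (((PySem.List.sorted (PySem.Set.ofList (l.filter (fun x => decide (0 < x))))
        (fun x => x) false)).flatMap (fun v => chunksModel v (occAbove l 0 v)))
    (modelG l 0) (fun g => g.headD 0)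
    (modelG_perm _ hndV hposV l 0 hcov)
    (modelG_pairwise l 0)

-- ===== VERDICT (by name: the statement is the Claim_ definition above) =====
theorem dier_spec : Claim_equal_dier := by
  intro l _ hpre
  unfold Spec_dier
  rw [dier_A_eq_model l, dier_B_eq_model l]
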